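-- pv_equiv track=rewrite | github.com/chatsci/Aeiva | src/aeiva/metaui/intent_spec.py | _reorder_root
-- ===== SOURCE A (Python) =====
-- from typing import Any, Dict, List, Optional, Set
--
-- _ORDER_BUCKETS: Dict[str, tuple[str, ...]] = {
--     "upload": ("uploader",),
--     "table": ("table_main", "timeline_table", "calendar_table", "kanban_todo", "kanban_doing", "kanban_done"),
--     "chart": ("chart_main", "timeline_chart"),
--     "form": ("form_main", "calendar_form", "media_control"),
--     "wizard": ("wizard_main",),
--     "chat": ("chat_main",),
--     "progress": ("progress_main",),
--     "export": ("export_main",),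
--     "kanban": ("kanban_board", "kanban_todo", "kanban_doing", "kanban_done"),
--     "timeline": ("timeline_chart", "timeline_table"),
--     "calendar": ("calendar_form", "calendar_table"),
--     "media": ("media_control", "media_status"),
-- }
--
-- def _reorder_root(root: List[str], requested_order: tuple[str, ...]) -> List[str]:
--     if not requested_order:
--         return root
--
--     root_set = set(root)
--     ordered: List[str] = []
--     for key in requested_order:
--         for component_id in _ORDER_BUCKETS.get(key, ()):
--             if component_id in root_set and component_id not in ordered:
--                 ordered.append(component_id)
--
--     for component_id in root:
--         if component_id != "intro" and component_id not in ordered: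
--             ordered.append(component_id)
--
--     if "intro" in root_set:
--         return ["intro"] + ordered
--     return ordered
-- ===== SOURCE B (Python) =====
-- _ORDER_BUCKETS = {
--     "upload": ("uploader",),
--     "table": ("table_main", "timeline_table", "calendar_table", "kanban_todo", "kanban_doing", "kanban_done"),
--     "chart": ("chart_main", "timeline_chart"),
--     "form": ("form_main", "calendar_form", "media_control"),
--     "wizard": ("wizard_main",),
--     "chat": ("chat_main",),
--     "progress": ("progress_main",),
--     "export": ("export_main",),
--     "kanban": ("kanban_board", "kanban_todo", "kanban_doing", "kanban_done"),
--     "timeline": ("timeline_chart", "timeline_table"),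
--     "calendar": ("calendar_form", "calendar_table"),
--     "media": ("media_control", "media_status"),
-- }
--
--
-- def _reorder_root(root, requested_order):
--     if not requested_order:
--         return root
--     # rank: each bucketed component id -> its first-occurrence position in the
--     # flattened stream of the requested buckets.
--     rank = {}
--     for key in requested_order:
--         for cid in _ORDER_BUCKETS.get(key, ()):
--             rank.setdefault(cid, len(rank))
--     deduped = list(dict.fromkeys(root))
--     pos = {cid: i for i, cid in enumerate(deduped)}
--     shift = len(rank)
--     body = sorted((c for c in deduped if c != "intro"),
--                   key=lambda c: rank.get(c, shift + pos[c]))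
--     if "intro" in pos:
--         return ["intro"] + body
--     return body
-- ===== Notes on version B (the rewrite author's own statement) =====
-- stated objective: faster
-- what changed: A builds the new order with append-if-unseen loops whose 'not in ordered' membership tests rescan the growing output list; B instead builds a first-occurrence rank dictionary from the flattened requested buckets, dedupes root via dict.fromkeys, and produces the body with ONE stable sort keyed by rank (bucketed ids) or shifted root position (leftovers).
import Mathlib
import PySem

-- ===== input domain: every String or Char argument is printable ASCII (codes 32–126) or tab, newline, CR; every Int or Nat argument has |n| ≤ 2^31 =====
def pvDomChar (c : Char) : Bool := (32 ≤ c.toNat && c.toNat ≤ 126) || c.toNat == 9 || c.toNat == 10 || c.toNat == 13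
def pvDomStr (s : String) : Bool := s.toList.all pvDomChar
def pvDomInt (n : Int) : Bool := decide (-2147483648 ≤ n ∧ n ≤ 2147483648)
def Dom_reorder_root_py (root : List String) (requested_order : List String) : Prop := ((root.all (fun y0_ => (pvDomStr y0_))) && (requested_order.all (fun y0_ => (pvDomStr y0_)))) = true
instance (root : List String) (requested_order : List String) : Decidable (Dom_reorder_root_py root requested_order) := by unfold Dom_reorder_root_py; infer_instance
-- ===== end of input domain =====

-- B replaces A's quadratic membership-scanning append loops by a rank dictionary plus one stable sort (measured faster in a timing run).
-- On empty requested_order both return the argument list itself (A returns the same object; equivalence here is about the value).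

-- ===== PORT A =====
-- the module constant _ORDER_BUCKETS (shared context of both implementations)
def pvBuckets : PySem.Dict String (List String) := PySem.Dict.ofList [
  ("upload", ["uploader"]),
  ("table", ["table_main", "timeline_table", "calendar_table", "kanban_todo", "kanban_doing", "kanban_done"]),
  ("chart", ["chart_main", "timeline_chart"]),
  ("form", ["form_main", "calendar_form", "media_control"]),
  ("wizard", ["wizard_main"]),
  ("chat", ["chat_main"]),
  ("progress", ["progress_main"]),
  ("export", ["export_main"]),
  ("kanban", ["kanban_board", "kanban_todo", "kanban_doing", "kanban_done"]),
  ("timeline", ["timeline_chart", "timeline_table"]),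
  ("calendar", ["calendar_form", "calendar_table"]),
  ("media", ["media_control", "media_status"])]

-- _ORDER_BUCKETS.get(key, ())
def pvBucketGet (key : String) : List String := PySem.Dict.getD pvBuckets key []

def reorder_root_py (root : List String) (requested_order : List String) : List String :=
  if requested_order = [] then root
  else
    let root_set : PySem.Set String := PySem.Set.ofList root
    let ordered : List String := requested_order.foldl (fun ordered key =>
      (pvBucketGet key).foldl (fun ordered c =>
        if PySem.Set.contains root_set c && !ordered.contains c then ordered ++ [c] else ordered) ordered) []
    let ordered : List String := root.foldl (fun ordered c =>
      if c != "intro" && !ordered.contains c then ordered ++ [c] else ordered) ordered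
    if PySem.Set.contains root_set "intro" then "intro" :: ordered else ordered

-- ===== PORT B =====
def reorder_root_py_alt (root : List String) (requested_order : List String) : List String :=
  if requested_order = [] then root
  else
    -- rank.setdefault(cid, len(rank)) over the flattened requested buckets
    let rank : PySem.Dict String Int := requested_order.foldl (fun d key =>
      (pvBucketGet key).foldl (fun d c => PySem.Dict.setdefault d c (PySem.Dict.size d : Int)) d) PySem.Dict.empty
    let deduped : List String := PySem.List.dedup root
    let pos : PySem.Dict String Int := (PySem.List.enumerate deduped 0).foldl
      (fun d p => PySem.Dict.insert d p.2 p.1) PySem.Dict.empty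
    let shift : Int := (PySem.Dict.size rank : Int)
    -- rank.get(c, shift + pos[c]); pos[c] never raises (every c comes from deduped), ported with default 0
    let body : List String := PySem.List.sorted (deduped.filter (fun c => c != "intro"))
      (fun c => (PySem.Dict.get? rank c).getD (shift + PySem.Dict.getD pos c 0)) false
    if PySem.Dict.contains pos "intro" then "intro" :: body else body

-- ===== PRECONDITION & SPEC =====
def Spec_reorder_root_py (root : List String) (requested_order : List String) (out : List String) : Prop := out = reorder_root_py_alt root requested_order
instance (root : List String) (requested_order : List String) (out : List String) : Decidable (Spec_reorder_root_py root requested_order out) := by unfold Spec_reorder_root_py; infer_instance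

-- ===== CLAIM (what is proved, stated in full; the proofs are below) =====
def Claim_equal_reorder_root_py : Prop := ∀ (root : List String) (requested_order : List String), Dom_reorder_root_py root requested_order → Spec_reorder_root_py root requested_order (reorder_root_py root requested_order)

-- ===== LEMMAS AND PROOFS =====

-- pairs (cᵢ, n + i) : the items list an enumeration dict holds
def pvEnumFrom (n : Int) : List String → List (String × Int)
  | [] => []
  | c :: t => (c, n) :: pvEnumFrom (n + 1) t

lemma pvEnumFrom_map_fst (L : List String) : ∀ n, (pvEnumFrom n L).map (·.1) = L := by
  induction L with
  | nil => intro n; rfl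
  | cons c t ih => intro n; simp [pvEnumFrom, ih]

lemma pvEnumFrom_length (L : List String) : ∀ n, (pvEnumFrom n L).length = L.length := by
  induction L with
  | nil => intro n; rfl
  | cons c t ih => intro n; simp [pvEnumFrom, ih]

lemma pvEnumFrom_mem (L : List String) : ∀ (n : Int) (i : Nat) (hi : i < L.length),
    (L[i], n + i) ∈ pvEnumFrom n L := by
  induction L with
  | nil => intro n i hi; simp at hi
  | cons c t ih => intro n i hi
                   cases i with
                   | zero => simp [pvEnumFrom]
                   | succ j =>
                     have := ih (n + 1) j (by simpa using hi)
                     simp only [pvEnumFrom, List.mem_cons]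
                     right
                     convert this using 2
                     push_cast
                     ring

-- Set.add-fold from any seed, in terms of dedup
lemma pvFoldAdd (T : List String) : ∀ (s : List String),
    T.foldl PySem.Set.add s = s ++ (PySem.List.dedup T).filter (fun y => !s.contains y) := by
  induction T with
  | nil => intro s; simp [PySem.List.dedup, PySem.Set.ofList]
  | cons x t ih =>
    intro s
    have hded : PySem.List.dedup (x :: t) = t.foldl PySem.Set.add [x] := by
      simp [PySem.List.dedup_eq_ofList, PySem.Set.ofList_eq_foldl, List.foldl_cons, PySem.Set.add]
    rw [List.foldl_cons, ih (PySem.Set.add s x), hded, ih [x]]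
    by_cases hx : x ∈ s
    · have hxs : s.contains x = true := by simpa [List.contains_eq_mem] using hx
      have hadd : PySem.Set.add s x = s := by simp [PySem.Set.add, hx]
      rw [hadd]
      simp only [List.filter_append, List.filter_filter]
      have h1 : ([x].filter (fun y => !s.contains y)) = [] := by
        simp [List.filter, hx]
      rw [h1]
      simp only [List.nil_append, List.append_cancel_left_eq]
      apply List.filter_congr
      intro y _
      by_cases hyx : y = x
      · subst hyx; simp [List.contains_eq_mem, hx]
      · simp [List.contains_eq_mem, hyx]
    · have hxs : s.contains x = false := by simpa [List.contains_eq_mem] using hx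
      have hadd : PySem.Set.add s x = s ++ [x] := by simp [PySem.Set.add, hx]
      rw [hadd]
      simp only [List.filter_append, List.filter_filter, List.append_assoc]
      have h1 : ([x].filter (fun y => !s.contains y)) = [x] := by simp [List.filter, hx]
      rw [h1]
      simp only [List.append_cancel_left_eq]
      apply List.filter_congr
      intro y _
      simp [List.contains_eq_mem]

lemma pvDedupCons (x : String) (t : List String) :
    PySem.List.dedup (x :: t) = x :: (PySem.List.dedup t).filter (fun y => !(y == x)) := by
  have hded : PySem.List.dedup (x :: t) = t.foldl PySem.Set.add [x] := by
    simp [PySem.List.dedup_eq_ofList, PySem.Set.ofList_eq_foldl, List.foldl_cons, PySem.Set.add]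
  rw [hded, pvFoldAdd]
  simp only [List.singleton_append, List.cons.injEq, true_and]
  apply List.filter_congr
  intro y _
  rw [Bool.eq_iff_iff]
  simp [List.contains_eq_mem]

-- the "append if p and unseen" loop, in terms of dedup
lemma pvGenFold (p : String → Bool) (l : List String) : ∀ (acc : List String),
    l.foldl (fun acc c => if p c && !acc.contains c then acc ++ [c] else acc) acc
      = acc ++ (PySem.List.dedup l).filter (fun c => p c && !acc.contains c) := by
  induction l with
  | nil => intro acc; simp [PySem.List.dedup, PySem.Set.ofList]
  | cons c t ih =>
    intro acc
    rw [List.foldl_cons, pvDedupCons]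
    by_cases hc : (p c && !acc.contains c) = true
    · rw [if_pos hc, ih]
      have hcm : c ∉ acc := by
        simp only [Bool.and_eq_true, Bool.not_eq_true'] at hc
        simpa [List.contains_eq_mem] using hc.2
      simp only [List.filter_cons, hc, if_true, List.filter_filter, List.append_assoc,
        List.singleton_append, List.append_cancel_left_eq, List.cons.injEq, true_and]
      apply List.filter_congr
      intro y _
      rw [Bool.eq_iff_iff]
      simp [List.contains_eq_mem]
      tauto
    · rw [if_neg hc, ih]
      have hc' : (p c && !acc.contains c) = false := by simpa using hc
      simp only [List.filter_cons, hc', Bool.false_eq_true, if_false, List.filter_filter,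
        List.append_cancel_left_eq]
      apply List.filter_congr
      intro y _
      by_cases hyc : y = c
      · subst hyc
        simp only [BEq.rfl, Bool.not_true, Bool.and_false]
        exact hc'
      · rw [Bool.eq_iff_iff]; simp [hyc]

-- the setdefault(c, len(d)) loop appends an enumeration of the unseen distinct elements
lemma pvRankItems (T : List String) : ∀ (d : PySem.Dict String Int),
    (T.foldl (fun d c => PySem.Dict.setdefault d c (PySem.Dict.size d : Int)) d).items
      = d.items ++ pvEnumFrom (PySem.Dict.size d : Int) ((PySem.List.dedup T).filter (fun c => !d.contains c)) := by
  induction T with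
  | nil => intro d; simp [PySem.List.dedup, PySem.Set.ofList, pvEnumFrom]
  | cons c t ih =>
    intro d
    rw [List.foldl_cons, pvDedupCons]
    by_cases hc : d.contains c = true
    · rw [PySem.Dict.setdefault_of_contains _ _ hc, ih]
      simp only [List.filter_cons, hc, Bool.not_true, Bool.false_eq_true, if_false,
        List.filter_filter, List.append_cancel_left_eq]
      congr 1
      apply List.filter_congr
      intro y _
      by_cases hyc : y = c
      · subst hyc; simp [hc]
      · simp [hyc]
    · have hc' : d.contains c = false := by simpa using hc
      rw [PySem.Dict.setdefault_of_not_contains _ _ hc', ih]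
      rw [PySem.Dict.items_insert_of_not_contains d _ hc']
      have hsize : PySem.Dict.size (d.insert c (PySem.Dict.size d : Int)) = PySem.Dict.size d + 1 := by
        show (d.insert c _).items.length = d.items.length + 1
        rw [PySem.Dict.items_insert_of_not_contains d _ hc']
        simp
      rw [hsize]
      simp only [List.filter_cons, hc', Bool.not_false, if_true, List.append_assoc,
        List.singleton_append, List.filter_filter]
      simp only [pvEnumFrom, List.append_cancel_left_eq, List.cons.injEq, true_and]
      have : ((PySem.Dict.size d : Nat) + 1 : Int) = (PySem.Dict.size d : Int) + 1 := by omega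
      rw [this]
      congr 1
      apply List.filter_congr
      intro y _
      rw [PySem.Dict.contains_insert]
      by_cases hyc : y = c
      · subst hyc; simp
      · have : (y == c) = false := by simp [hyc]
        simp [this]

lemma pvSwapEnum (xs : List String) : ∀ (s : Int),
    (PySem.List.enumerate xs s).map (fun p => (p.2, p.1)) = pvEnumFrom s xs := by
  induction xs with
  | nil => intro s; rfl
  | cons c t ih => intro s; simp only [PySem.List.enumerate_cons, List.map_cons, pvEnumFrom, ih]

-- lookup in an enumeration dict
lemma pvLookup (D : PySem.Dict String Int) (L : List String) (hit : D.items = pvEnumFrom 0 L)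
    (hnd : L.Nodup) (i : Nat) (hi : i < L.length) : D.get? L[i] = some i := by
  have hk : D.keys = L := by
    show D.items.map (·.1) = L
    rw [hit, pvEnumFrom_map_fst]
  have hmem : (L[i], (i : Int)) ∈ D.items := by
    rw [hit]
    simpa using pvEnumFrom_mem L 0 i hi
  exact PySem.Dict.get?_of_mem_items D hmem (by rw [hk]; exact hnd)

-- no bucket of the constant dict contains "intro"
lemma pvNoIntroGetD (L : List (String × List String)) (hall : ∀ p ∈ L, "intro" ∉ p.2) (k : String) :
    "intro" ∉ Option.getD (PySem.Dict.get? (PySem.Dict.mk L) k) [] := by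
  induction L with
  | nil => simp [PySem.Dict.get?]
  | cons p t ih =>
    rw [show PySem.Dict.mk (p :: t) = PySem.Dict.mk ((p.1, p.2) :: t) from rfl, PySem.Dict.get?_mk_cons]
    by_cases hk : (p.1 == k) = true
    · rw [if_pos hk]
      exact hall p (List.mem_cons_self ..)
    · rw [if_neg hk]
      exact ih (fun q hq => hall q (List.mem_cons_of_mem _ hq))

lemma pvBucket_no_intro (k : String) : "intro" ∉ pvBucketGet k := by
  unfold pvBucketGet
  rw [PySem.Dict.getD_eq_get?_getD]
  have h : pvBuckets = PySem.Dict.mk pvBuckets.items := rfl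
  rw [h]
  apply pvNoIntroGetD
  decide

-- proof-side views of the two programs (ro ≠ [] branch)
def pvO1 (root ro : List String) : List String :=
  ro.foldl (fun ordered key =>
    (pvBucketGet key).foldl (fun ordered c =>
      if PySem.Set.contains (PySem.Set.ofList root) c && !ordered.contains c then ordered ++ [c] else ordered) ordered) []
def pvO2 (root ro : List String) : List String :=
  root.foldl (fun ordered c =>
    if c != "intro" && !ordered.contains c then ordered ++ [c] else ordered) (pvO1 root ro)
def pvRank (ro : List String) : PySem.Dict String Int :=
  ro.foldl (fun d key => (pvBucketGet key).foldl (fun d c => PySem.Dict.setdefault d c (PySem.Dict.size d : Int)) d) PySem.Dict.empty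
def pvPos (root : List String) : PySem.Dict String Int :=
  (PySem.List.enumerate (PySem.List.dedup root)).foldl (fun d p => PySem.Dict.insert d p.2 p.1) PySem.Dict.empty
def pvKey (root ro : List String) (c : String) : Int :=
  ((pvRank ro).get? c).getD (((pvRank ro).size : Int) + (pvPos root).getD c 0)
def pvBody (root ro : List String) : List String :=
  PySem.List.sorted ((PySem.List.dedup root).filter (fun c => c != "intro")) (pvKey root ro) false


lemma pvO1_eq (root ro : List String) :
    pvO1 root ro = (PySem.List.dedup (ro.flatMap pvBucketGet)).filter
      (fun c => PySem.Set.contains (PySem.Set.ofList root) c) := by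
  unfold pvO1
  rw [← List.foldl_flatMap]
  rw [pvGenFold (fun c => PySem.Set.contains (PySem.Set.ofList root) c) (ro.flatMap pvBucketGet) []]
  simp

lemma pvRank_items (ro : List String) :
    (pvRank ro).items = pvEnumFrom 0 (PySem.List.dedup (ro.flatMap pvBucketGet)) := by
  unfold pvRank
  rw [← List.foldl_flatMap]
  rw [pvRankItems (ro.flatMap pvBucketGet) PySem.Dict.empty]
  simp [pysem, PySem.Dict.empty]

lemma pvPos_items (root : List String) : (pvPos root).items = pvEnumFrom 0 (PySem.List.dedup root) := by
  unfold pvPos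
  refine Eq.trans (PySem.Dict.items_foldl_insert_fresh
    (d := PySem.Dict.empty) (l := PySem.List.enumerate (PySem.List.dedup root) 0)
    (k := fun p => p.2) (v := fun p => p.1) ?_ ?_) ?_
  · intro a _; simp [pysem, PySem.Dict.empty]
  · rw [PySem.List.map_snd_enumerate]; exact PySem.List.nodup_dedup _
  · rw [pvSwapEnum]; simp [pysem, PySem.Dict.empty]

lemma pvMainAux (root ro : List String) :
    (if PySem.Set.contains (PySem.Set.ofList root) "intro" then "intro" :: pvO2 root ro else pvO2 root ro)
      = (if PySem.Dict.contains (pvPos root) "intro" then "intro" :: pvBody root ro else pvBody root ro) := by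
  have hKnd : (PySem.List.dedup (ro.flatMap pvBucketGet)).Nodup := PySem.List.nodup_dedup _
  have hK'nd : (PySem.List.dedup root).Nodup := PySem.List.nodup_dedup _
  set K := PySem.List.dedup (ro.flatMap pvBucketGet) with hKdef
  set K' := PySem.List.dedup root with hK'def
  have hKintro : ∀ c ∈ K, c ≠ "intro" := by
    intro c hc hceq
    subst hceq
    have hmem : "intro" ∈ ro.flatMap pvBucketGet := (PySem.List.mem_dedup _ _).mp hc
    rcases List.mem_flatMap.mp hmem with ⟨k, _, hk⟩
    exact pvBucket_no_intro k hk
  have hO1 : pvO1 root ro = K.filter (fun c => PySem.Set.contains (PySem.Set.ofList root) c) :=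
    pvO1_eq root ro
  set O1 := pvO1 root ro with hO1def
  have hmemO1 : ∀ c, c ∈ O1 ↔ c ∈ K ∧ c ∈ root := by
    intro c
    rw [hO1]
    simp [List.mem_filter, PySem.Set.contains, List.contains_eq_mem, PySem.Set.mem_ofList]
  have hO1nd : O1.Nodup := by rw [hO1]; exact hKnd.filter _
  set T := K'.filter (fun c => (c != "intro") && !O1.contains c) with hTdef
  have hO2 : pvO2 root ro = O1 ++ T := by
    unfold pvO2
    rw [← hO1def, pvGenFold (fun c => c != "intro") root O1, ← hK'def]
  have hmemT : ∀ c, c ∈ T ↔ c ∈ root ∧ c ≠ "intro" ∧ c ∉ O1 := by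
    intro c
    rw [hTdef]
    simp [List.mem_filter, List.contains_eq_mem, bne_iff_ne, hK'def]
  have hTnd : T.Nodup := hK'nd.filter _
  -- rank and pos lookup facts
  have hRit : (pvRank ro).items = pvEnumFrom 0 K := pvRank_items ro
  have hRkeys : (pvRank ro).keys = K := by
    show (pvRank ro).items.map _ = K
    rw [hRit, pvEnumFrom_map_fst]
  have hRsize : ((pvRank ro).size : Int) = (K.length : Int) := by
    show ((pvRank ro).items.length : Int) = _
    rw [hRit, pvEnumFrom_length]
  have hRget : ∀ (i : Nat), (hi : i < K.length) → (pvRank ro).get? K[i] = some i :=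
    pvLookup _ _ hRit hKnd
  have hRnone : ∀ c, c ∉ K → (pvRank ro).get? c = none := by
    intro c hc
    rw [PySem.Dict.get?_eq_none_iff_not_mem_keys, hRkeys]
    exact hc
  have hPit : (pvPos root).items = pvEnumFrom 0 K' := pvPos_items root
  have hPkeys : (pvPos root).keys = K' := by
    show (pvPos root).items.map _ = K'
    rw [hPit, pvEnumFrom_map_fst]
  have hPget : ∀ (i : Nat), (hi : i < K'.length) → (pvPos root).get? K'[i] = some i :=
    pvLookup _ _ hPit hK'nd
  have hPgetD : ∀ (i : Nat), (hi : i < K'.length) → (pvPos root).getD K'[i] 0 = (i : Int) := by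
    intro i hi
    rw [PySem.Dict.getD_eq_get?_getD, hPget i hi]
    rfl
  -- key values on the two halves
  have hkO1 : ∀ c ∈ O1, ∃ i : Nat, i < K.length ∧ pvKey root ro c = (i : Int) := by
    intro c hc
    obtain ⟨hcK, _⟩ := (hmemO1 c).mp hc
    obtain ⟨i, hi, hci⟩ := List.mem_iff_getElem.mp hcK
    refine ⟨i, hi, ?_⟩
    unfold pvKey
    rw [← hci, hRget i hi]
    rfl
  have hkT : ∀ c ∈ T, ∃ j : Nat, j < K'.length ∧
      pvKey root ro c = ((pvRank ro).size : Int) + (j : Int) ∧ (pvPos root).getD c 0 = (j : Int) := by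
    intro c hc
    obtain ⟨hcr, hcni, hcno⟩ := (hmemT c).mp hc
    have hcK : c ∉ K := fun h => hcno ((hmemO1 c).mpr ⟨h, hcr⟩)
    have hcK' : c ∈ K' := by rw [hK'def, PySem.List.mem_dedup]; exact hcr
    obtain ⟨j, hj, hcj⟩ := List.mem_iff_getElem.mp hcK'
    have hpd : (pvPos root).getD c 0 = (j : Int) := by rw [← hcj]; exact hPgetD j hj
    refine ⟨j, hj, ?_, hpd⟩
    unfold pvKey
    rw [hRnone c hcK, hpd]
    rfl
  -- pairwise strict key increase on O1 ++ T
  have pwK : K.Pairwise (fun a b => pvKey root ro a < pvKey root ro b) := by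
    rw [List.pairwise_iff_getElem]
    intro i j hi hj hij
    unfold pvKey
    rw [hRget i hi, hRget j hj]
    show ((i : Int) : Int) < (j : Int)
    exact_mod_cast hij
  have pwO1 : O1.Pairwise (fun a b => pvKey root ro a < pvKey root ro b) := by
    rw [hO1]
    exact List.Pairwise.filter _ pwK
  have pwK' : K'.Pairwise (fun a b => (pvPos root).getD a 0 < (pvPos root).getD b 0) := by
    rw [List.pairwise_iff_getElem]
    intro i j hi hj hij
    rw [hPgetD i hi, hPgetD j hj]
    exact_mod_cast hij
  have pwT : T.Pairwise (fun a b => pvKey root ro a < pvKey root ro b) := by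
    have h1 : T.Pairwise (fun a b => (pvPos root).getD a 0 < (pvPos root).getD b 0) := by
      rw [hTdef]
      exact List.Pairwise.filter _ pwK'
    refine List.Pairwise.imp_of_mem ?_ h1
    intro a b ha hb hab
    obtain ⟨ja, hja, hka, hpa⟩ := hkT a ha
    obtain ⟨jb, hjb, hkb, hpb⟩ := hkT b hb
    rw [hka, hkb]
    rw [hpa, hpb] at hab
    omega
  have cross : ∀ a ∈ O1, ∀ b ∈ T, pvKey root ro a < pvKey root ro b := by
    intro a ha b hb
    obtain ⟨i, hi, hka⟩ := hkO1 a ha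
    obtain ⟨j, hj, hkb, _⟩ := hkT b hb
    rw [hka, hkb, hRsize]
    omega
  have pw : (O1 ++ T).Pairwise (fun a b => pvKey root ro a < pvKey root ro b) :=
    List.pairwise_append.mpr ⟨pwO1, pwT, cross⟩
  -- permutation with B's sort input
  set F := K'.filter (fun c => c != "intro") with hFdef
  have hperm : (O1 ++ T).Perm F := by
    have h2 : T = F.filter (fun c => !O1.contains c) := by
      rw [hFdef, List.filter_filter]
      apply List.filter_congr
      intro y _
      rw [Bool.and_comm]
    have h3 : O1.Perm (F.filter (fun c => O1.contains c)) := by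
      refine (List.perm_ext_iff_of_nodup hO1nd ((hK'nd.filter _).filter _)).mpr ?_
      intro a
      rw [hmemO1 a]
      simp only [List.mem_filter, List.contains_eq_mem, bne_iff_ne, hK'def,
        PySem.List.mem_dedup, decide_eq_true_eq]
      constructor
      · rintro ⟨haK, har⟩
        exact ⟨⟨har, hKintro a haK⟩, (hmemO1 a).mpr ⟨haK, har⟩⟩
      · rintro ⟨_, haO1⟩
        exact (hmemO1 a).mp haO1
    rw [h2]
    exact (h3.append_right _).trans (List.filter_append_perm _ F)
  have hbody : pvBody root ro = O1 ++ T := by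
    unfold pvBody
    rw [← hK'def, ← hFdef]
    exact PySem.List.sorted_eq_of_perm_of_pairwise_lt _ _ _ hperm pw
  have hcont : PySem.Dict.contains (pvPos root) "intro" = PySem.Set.contains (PySem.Set.ofList root) "intro" := by
    rw [Bool.eq_iff_iff, PySem.Dict.contains_iff_mem_keys, hPkeys]
    simp [hK'def, PySem.Set.contains, List.contains_eq_mem, PySem.Set.mem_ofList]
  rw [hO2, hbody, hcont]

lemma pvMain (root requested_order : List String) (hro : requested_order ≠ []) :
    reorder_root_py root requested_order = reorder_root_py_alt root requested_order := by
  unfold reorder_root_py reorder_root_py_alt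
  rw [if_neg hro, if_neg hro]
  exact pvMainAux root requested_order

-- ===== VERDICT (by name: the statement is the Claim_ definition above) =====
theorem reorder_root_py_spec : Claim_equal_reorder_root_py := by
  intro root ro _
  unfold Spec_reorder_root_py
  by_cases hro : ro = []
  · subst hro; rfl
  · exact pvMain root ro hro
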